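-- pv_equiv track=rewrite | github.com/SahasT23/EEE3094_Dissertation | Code/MOVG_Dynamic_Histogram/visualization.py | _is_chronologically_valid_enhanced
-- ===== SOURCE A (Python) =====
-- def _is_chronologically_valid_enhanced(chain):
--     """ENHANCED: Check for chronologically valid pattern (no forward-then-backward)."""
--     if len(chain) <= 2:
--         return True
--
--     went_forward = False
--     for i in range(len(chain) - 1):
--         if chain[i] < chain[i + 1]:  # Forward in time
--             went_forward = True
--         elif chain[i] > chain[i + 1] and went_forward:  # Backward after forward
--             return False  # Invalid pattern
--
--     return True
-- ===== SOURCE B (Python) =====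
-- def _is_chronologically_valid_enhanced(chain):
--     """Two-phase scan: locate the first strict increase, then forbid any strict
--     decrease after it. No flag, no len guard."""
--     n = len(chain)
--     i = 0
--     while i < n - 1 and not (chain[i] < chain[i + 1]):
--         i += 1
--     if i >= n - 1:
--         return True  # no forward step at all
--     for j in range(i + 1, n - 1):
--         if chain[j] > chain[j + 1]:
--             return False
--     return True
-- ===== Notes on version B (the rewrite author's own statement) =====
-- stated objective: simpler
-- what changed: Replaces the flag-carrying single loop with two flag-free phases: first find the first strictly increasing adjacent pair, then scan the remaining pairs for any strict decrease; the len<=2 guard disappears.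
import Mathlib
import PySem

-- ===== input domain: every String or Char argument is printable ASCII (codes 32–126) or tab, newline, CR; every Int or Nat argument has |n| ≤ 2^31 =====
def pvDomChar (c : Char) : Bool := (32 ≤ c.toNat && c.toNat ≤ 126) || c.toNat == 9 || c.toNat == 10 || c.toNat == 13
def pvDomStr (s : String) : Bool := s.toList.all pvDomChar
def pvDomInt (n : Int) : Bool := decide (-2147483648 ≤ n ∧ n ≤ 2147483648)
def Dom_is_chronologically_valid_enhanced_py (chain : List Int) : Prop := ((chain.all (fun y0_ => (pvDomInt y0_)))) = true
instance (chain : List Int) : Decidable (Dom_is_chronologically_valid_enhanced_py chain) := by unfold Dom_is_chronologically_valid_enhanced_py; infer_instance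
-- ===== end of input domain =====

-- B replaces A's flag-carrying single loop by two flag-free phases (find first strict
-- increase, then forbid any later strict decrease); objective: simpler.

-- ===== PORT A =====
-- A's loop over i in range(len-1), comparing chain[i] with chain[i+1] while carrying
-- the went_forward flag, transcribed as structural recursion over adjacent pairs.
def pvLoopA : List Int → Bool → Bool
  | x :: y :: rest, wf =>
    if x < y then pvLoopA (y :: rest) true
    else if x > y && wf then false
    else pvLoopA (y :: rest) wf
  | _, _ => true

def is_chronologically_valid_enhanced_py (chain : List Int) : Bool :=
  if chain.length ≤ 2 then true else pvLoopA chain false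

-- ===== PORT B =====
-- Phase 1: drop pairs until the first strict increase; returns the suffix after it (or none).
def pvFirstIncSuffix : List Int → Option (List Int)
  | x :: y :: rest => if x < y then some (y :: rest) else pvFirstIncSuffix (y :: rest)
  | _ => none

-- Phase 2: no strict decrease among adjacent pairs.
def pvNoDecrease : List Int → Bool
  | x :: y :: rest => if x > y then false else pvNoDecrease (y :: rest)
  | _ => true

def is_chronologically_valid_enhanced_py_alt (chain : List Int) : Bool :=
  match pvFirstIncSuffix chain with
  | none => true
  | some s => pvNoDecrease s

-- ===== PRECONDITION & SPEC =====
def Spec_is_chronologically_valid_enhanced_py (chain : List Int) (out : Bool) : Prop := out = is_chronologically_valid_enhanced_py_alt chain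
instance (chain : List Int) (out : Bool) : Decidable (Spec_is_chronologically_valid_enhanced_py chain out) := by unfold Spec_is_chronologically_valid_enhanced_py; infer_instance

-- ===== CLAIM (what is proved, stated in full; the proofs are below) =====
def Claim_equal_is_chronologically_valid_enhanced_py : Prop := ∀ (chain : List Int), Dom_is_chronologically_valid_enhanced_py chain → Spec_is_chronologically_valid_enhanced_py chain (is_chronologically_valid_enhanced_py chain)

-- ===== LEMMAS AND PROOFS =====

-- Once the flag is set, A's loop is exactly the no-decrease scan.
theorem pvLoopA_true (l : List Int) : pvLoopA l true = pvNoDecrease l := by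
  induction l with
  | nil => rfl
  | cons x t ih =>
    cases t with
    | nil => rfl
    | cons y rest =>
      simp only [pvLoopA, pvNoDecrease]
      by_cases h1 : x < y
      · have h2 : ¬ x > y := by omega
        simp [h1, h2, ih]
      · by_cases h2 : x > y
        · simp [h1, h2]
        · simp [h1, h2, ih]

-- Before the flag is set, A's loop equals B's two-phase composition.
theorem pvLoopA_false (l : List Int) :
    pvLoopA l false = is_chronologically_valid_enhanced_py_alt l := by
  induction l with
  | nil => rfl
  | cons x t ih =>
    cases t with
    | nil => rfl
    | cons y rest =>
      simp only [pvLoopA, is_chronologically_valid_enhanced_py_alt, pvFirstIncSuffix]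
      by_cases h1 : x < y
      · simp [h1, pvLoopA_true (y :: rest)]
      · simp only [is_chronologically_valid_enhanced_py_alt] at ih
        simp [h1, ih]

-- On lists of length ≤ 2, B also returns true.
theorem alt_short (l : List Int) (h : l.length ≤ 2) :
    is_chronologically_valid_enhanced_py_alt l = true := by
  match l with
  | [] => rfl
  | [_] => rfl
  | [x, y] =>
    simp only [is_chronologically_valid_enhanced_py_alt, pvFirstIncSuffix]
    by_cases h1 : x < y <;> simp [h1, pvNoDecrease]
  | _ :: _ :: _ :: _ => simp at h

-- ===== VERDICT (by name: the statement is the Claim_ definition above) =====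
theorem is_chronologically_valid_enhanced_py_spec : Claim_equal_is_chronologically_valid_enhanced_py := by
  intro chain _
  unfold Spec_is_chronologically_valid_enhanced_py is_chronologically_valid_enhanced_py
  by_cases h : chain.length ≤ 2
  · simp [h, alt_short chain h]
  · simp [h, pvLoopA_false chain]
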